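-- pv_equiv track=rewrite | github.com/pcw109550/write-up | 2020/CryptoCTF/Fatima/solve.py | helical_rev
-- ===== SOURCE A (Python) =====
-- def helical_rev(A):
--     B = [[0 for _ in range(len(A))] for _ in range(len(A))]
--     cnt = 0
--
--     row = len(A)
--     col = len(A[0])
--     tmp = []
--     dir = 0
--     for k in range(0, row):
--         if dir == 0:
--             i = k
--             for j in range(0, k+1):
--                 B[i][j] = A[cnt // len(A)][cnt % len(A)]
--                 cnt += 1
--                 i -= 1
--             dir = 1
--         else:
--             j = k
--             for i in range(0, k+1):
--                 B[i][j] = A[cnt // len(A)][cnt % len(A)]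
--                 cnt += 1
--                 j -= 1
--             dir = 0
--     for k in range(1, row):
--         if dir == 0:
--             i = row - 1
--             for j in range(k, row):
--                 B[i][j] = A[cnt // len(A)][cnt % len(A)]
--                 cnt += 1
--                 tmp.append(A[i][j])
--                 i -= 1
--             dir = 1
--         else:
--             j = row - 1
--             for i in range(k, row):
--                 B[i][j] = A[cnt // len(A)][cnt % len(A)]
--                 cnt += 1
--                 j -= 1
--             dir = 0
--     assert cnt == len(A) ** 2
--
--     return B
-- ===== SOURCE B (Python) =====
-- def helical_rev(A):
--     # Closed-form index map instead of A's sequential traversal: each target cell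
--     # (i, j) independently receives flat element rank(i, j), where rank is the
--     # zigzag rank of the anti-diagonal cell computed arithmetically (triangular
--     # count of earlier diagonals + parity-dependent offset). No counter, no
--     # write order: B is built cell by cell in row-major order.
--     n = len(A)
--
--     def rank(i, j):
--         d = i + j
--         if d < n:
--             before = d * (d + 1) // 2
--         else:
--             before = n * n - (2 * n - 1 - d) * (2 * n - d) // 2
--         lo = max(0, d - n + 1)
--         hi = min(d, n - 1)
--         return before + (i - lo if d % 2 == 1 else hi - i)
--
--     def cell(i, j):
--         r = rank(i, j)
--         return A[r // n][r % n]
--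
--     return [[cell(i, j) for j in range(n)] for i in range(n)]
-- ===== Notes on version B (the rewrite author's own statement) =====
-- stated objective: alternative
-- what changed: Replaces A's sequential zigzag traversal with a shared counter by a closed-form permutation: each output cell (i,j) independently computes its zigzag rank arithmetically (triangular count of earlier anti-diagonals plus a parity-dependent offset) and reads that flat element, building B in row-major order with no counter or write order.
import Mathlib
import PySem

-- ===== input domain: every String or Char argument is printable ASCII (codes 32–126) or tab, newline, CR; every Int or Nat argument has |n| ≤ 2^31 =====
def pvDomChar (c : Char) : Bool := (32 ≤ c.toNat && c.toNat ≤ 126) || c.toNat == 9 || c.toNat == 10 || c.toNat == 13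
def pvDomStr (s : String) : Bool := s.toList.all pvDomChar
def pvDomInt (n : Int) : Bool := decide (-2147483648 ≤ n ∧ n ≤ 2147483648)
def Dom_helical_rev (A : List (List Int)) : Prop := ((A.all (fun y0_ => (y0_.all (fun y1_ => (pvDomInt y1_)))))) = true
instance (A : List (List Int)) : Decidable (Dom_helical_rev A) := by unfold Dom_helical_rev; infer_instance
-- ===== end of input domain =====

-- B replaces A's sequential zigzag traversal by a closed-form per-cell rank formula
-- (objective: alternative); equal return value on Pre_; A raises elsewhere.

-- ===== PORT A =====
-- shared low-level helpers: Python "B[i][j] = v" (negative index wraps; an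
-- out-of-range write raises in Python, which never happens on Pre_) and the
-- source read "A[cnt // len(A)][cnt % len(A)]" (out of range raises in Python
-- and is excluded by Pre_; here a default 0 stands in outside Pre_).
def pySet2 (B : List (List Int)) (i j : Int) (v : Int) : List (List Int) :=
  let i' := (if i < 0 then i + B.length else i).toNat
  let r := B.getD i' []
  B.set i' (r.set (if j < 0 then j + r.length else j).toNat v)

def srcA (A : List (List Int)) (cnt : Int) : Int :=
  PySem.List.pyGetD (PySem.List.pyGetD A (PySem.Int.floordiv cnt A.length) [])
    (PySem.Int.mod cnt A.length) 0

-- loop bodies of A, named so the proofs can speak about them; state carries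
-- (B, cnt) plus the auxiliary index that the Python decrements by hand.
def body1e (A : List (List Int)) (s : (List (List Int) × Int) × Int) (j : Int) :
    (List (List Int) × Int) × Int :=
  ((pySet2 s.1.1 s.2 j (srcA A s.1.2), s.1.2 + 1), s.2 - 1)

def body1o (A : List (List Int)) (s : (List (List Int) × Int) × Int) (i : Int) :
    (List (List Int) × Int) × Int :=
  ((pySet2 s.1.1 i s.2 (srcA A s.1.2), s.1.2 + 1), s.2 - 1)

def outer1 (A : List (List Int)) (st : (List (List Int) × Int) × Int) (k : Int) :
    (List (List Int) × Int) × Int :=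
  if st.2 = 0 then
    (((PySem.List.pyRange 0 (k + 1) 1).foldl (body1e A) (st.1, k)).1, 1)
  else
    (((PySem.List.pyRange 0 (k + 1) 1).foldl (body1o A) (st.1, k)).1, 0)

-- second-loop bodies: the state additionally carries tmp (dead for the result)
def body2e (A : List (List Int)) (s : ((List (List Int) × Int) × List Int) × Int) (j : Int) :
    ((List (List Int) × Int) × List Int) × Int :=
  (((pySet2 s.1.1.1 s.2 j (srcA A s.1.1.2), s.1.1.2 + 1),
    s.1.2 ++ [PySem.List.pyGetD (PySem.List.pyGetD A s.2 []) j 0]), s.2 - 1)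

def body2o (A : List (List Int)) (s : ((List (List Int) × Int) × List Int) × Int) (i : Int) :
    ((List (List Int) × Int) × List Int) × Int :=
  (((pySet2 s.1.1.1 i s.2 (srcA A s.1.1.2), s.1.1.2 + 1), s.1.2), s.2 - 1)

def outer2 (A : List (List Int)) (row : Int)
    (st : ((List (List Int) × Int) × List Int) × Int) (k : Int) :
    ((List (List Int) × Int) × List Int) × Int :=
  if st.2 = 0 then
    (((PySem.List.pyRange k row 1).foldl (body2e A) (st.1, row - 1)).1, 1)
  else
    (((PySem.List.pyRange k row 1).foldl (body2o A) (st.1, row - 1)).1, 0)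

def helical_rev (A : List (List Int)) : List (List Int) :=
  let B0 : List (List Int) := List.replicate A.length (List.replicate A.length 0)
  let row : Int := A.length
  -- Python also reads col = len(A[0]) (IndexError on A = [], excluded by Pre_; col unused)
  let s1 := (PySem.List.pyRange 0 row 1).foldl (outer1 A) ((B0, 0), 0)
  let s2 := (PySem.List.pyRange 1 row 1).foldl (outer2 A row) ((s1.1, []), s1.2)
  -- assert cnt == len(A) ** 2 holds on every input where the Python returns
  s2.1.1.1

-- ===== PORT B =====
-- closed-form helpers of Source B: cells on anti-diagonals before d, and the zigzag
-- rank of cell (i, j)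
def triB (n d : Int) : Int :=
  if d < n then PySem.Int.floordiv (d * (d + 1)) 2
  else n * n - PySem.Int.floordiv ((2 * n - 1 - d) * (2 * n - d)) 2

def rankB (n i j : Int) : Int :=
  let d := i + j
  let lo := max 0 (d - n + 1)
  let hi := min d (n - 1)
  triB n d + (if PySem.Int.mod d 2 = 1 then i - lo else hi - i)

def helical_rev_alt (A : List (List Int)) : List (List Int) :=
  let n : Int := A.length
  (PySem.List.pyRange 0 n 1).map (fun i =>
    (PySem.List.pyRange 0 n 1).map (fun j => srcA A (rankB n i j)))

-- ===== PRECONDITION & SPEC =====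
-- Pre_ excludes exactly the inputs on which the Python A raises IndexError:
-- the empty matrix (len(A[0])) and matrices with a row shorter than len(A).
-- (On [] this B returns [] where A raises; on short rows B raises too.)
def Pre_helical_rev (A : List (List Int)) : Prop :=
  A ≠ [] ∧ ∀ r ∈ A, A.length ≤ r.length
instance (A : List (List Int)) : Decidable (Pre_helical_rev A) := by
  unfold Pre_helical_rev; infer_instance

def pvWitness_helical_rev : List (List Int) := [[1, 2], [3, 4]]

def Spec_helical_rev (A : List (List Int)) (out : List (List Int)) : Prop := out = helical_rev_alt A
instance (A : List (List Int)) (out : List (List Int)) : Decidable (Spec_helical_rev A out) := by unfold Spec_helical_rev; infer_instance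

-- ===== CLAIM (what is proved, stated in full; the proofs are below) =====
def Claim_equal_helical_rev : Prop := ∀ (A : List (List Int)), Dom_helical_rev A → Pre_helical_rev A → Spec_helical_rev A (helical_rev A)

-- ===== LEMMAS AND PROOFS =====

-- the canonical per-cell write and the per-diagonal write both traversals perform
def wbody (A : List (List Int)) (d : Int) (st : List (List Int) × Int) (i : Int) :
    List (List Int) × Int :=
  (pySet2 st.1 i (d - i) (srcA A st.2), st.2 + 1)

def dwrite (A : List (List Int)) (n : Int) (st : List (List Int) × Int) (d : Int) :
    List (List Int) × Int :=
  (if PySem.Int.mod d 2 = 1 then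
      (PySem.List.pyRange (min d (n - 1)) (max 0 (d - n + 1) - 1) (-1)).reverse
    else
      PySem.List.pyRange (min d (n - 1)) (max 0 (d - n + 1) - 1) (-1)).foldl (wbody A d) st

-- A's first-loop dir=0 inner pass: j ascends while the hand-held i descends;
-- it is the wbody-fold over the descending diagonal coordinates.
theorem inner1e (A : List (List Int)) (d : Int) (m : Nat) (j0 : Int) (st : List (List Int) × Int) :
    ((List.range m).map (fun t : Nat => j0 + (t : Int))).foldl (body1e A) (st, d - j0)
      = (((List.range m).map (fun t : Nat => d - j0 - (t : Int))).foldl (wbody A d) st,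
          d - j0 - m) := by
  induction m with
  | zero => simp
  | succ m ih =>
    rw [List.range_succ]
    simp only [List.map_append, List.foldl_append, ih, List.map_cons, List.map_nil,
      List.foldl_cons, List.foldl_nil, body1e, wbody]
    have h1 : d - (d - j0 - (m : Int)) = j0 + m := by ring
    simp only [h1, Nat.cast_add, Nat.cast_one]
    ring_nf

-- A's first-loop dir=1 inner pass: i ascends, the hand-held j = d - i descends;
-- step for step it IS the wbody-fold over the same ascending list.
theorem inner1o (A : List (List Int)) (d : Int) (m : Nat) (i0 : Int) (st : List (List Int) × Int) :
    ((List.range m).map (fun t : Nat => i0 + (t : Int))).foldl (body1o A) (st, d - i0)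
      = (((List.range m).map (fun t : Nat => i0 + (t : Int))).foldl (wbody A d) st,
          d - i0 - m) := by
  induction m with
  | zero => simp
  | succ m ih =>
    rw [List.range_succ]
    simp only [List.map_append, List.foldl_append, ih, List.map_cons, List.map_nil,
      List.foldl_cons, List.foldl_nil, body1o, wbody]
    have h1 : d - (i0 + (m : Int)) = d - i0 - m := by ring
    simp only [h1, Nat.cast_add, Nat.cast_one]
    ring_nf

-- second-loop dir=0 inner pass, additionally growing tmp (dead for the result)
theorem inner2e (A : List (List Int)) (d : Int) (m : Nat) (j0 : Int)
    (st : List (List Int) × Int) (tmp : List Int) :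
    ((List.range m).map (fun t : Nat => j0 + (t : Int))).foldl (body2e A) ((st, tmp), d - j0)
      = ((((List.range m).map (fun t : Nat => d - j0 - (t : Int))).foldl (wbody A d) st,
          tmp ++ (List.range m).map (fun t : Nat =>
            PySem.List.pyGetD (PySem.List.pyGetD A (d - j0 - (t : Int)) []) (j0 + (t : Int)) 0)),
          d - j0 - m) := by
  induction m with
  | zero => simp
  | succ m ih =>
    rw [List.range_succ]
    simp only [List.map_append, List.foldl_append, ih, List.map_cons, List.map_nil,
      List.foldl_cons, List.foldl_nil, body2e, wbody, List.append_assoc]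
    have h1 : d - (d - j0 - (m : Int)) = j0 + m := by ring
    simp only [h1, Nat.cast_add, Nat.cast_one]
    ring_nf

-- second-loop dir=1 inner pass: tmp is untouched
theorem inner2o (A : List (List Int)) (d : Int) (m : Nat) (i0 : Int)
    (st : List (List Int) × Int) (tmp : List Int) :
    ((List.range m).map (fun t : Nat => i0 + (t : Int))).foldl (body2o A) ((st, tmp), d - i0)
      = ((((List.range m).map (fun t : Nat => i0 + (t : Int))).foldl (wbody A d) st, tmp),
          d - i0 - m) := by
  induction m with
  | zero => simp
  | succ m ih =>
    rw [List.range_succ]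
    simp only [List.map_append, List.foldl_append, ih, List.map_cons, List.map_nil,
      List.foldl_cons, List.foldl_nil, body2o, wbody]
    have h1 : d - (i0 + (m : Int)) = d - i0 - m := by ring
    simp only [h1, Nat.cast_add, Nat.cast_one]
    ring_nf

theorem rev_desc (N : Nat) (a b : Int) (hab : a - b = (N : Int) - 1) :
    ((List.range N).map (fun t : Nat => a - (t : Int))).reverse
      = (List.range N).map (fun t : Nat => b + (t : Int)) := by
  apply List.ext_getElem
  · simp
  · intro i h1 h2
    simp at h1 h2
    simp [List.getElem_reverse]
    omega

-- primed inner lemmas: the aux-index start written through an arbitrary name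
theorem inner2e' (A : List (List Int)) (d j0 a : Int) (ha : d - j0 = a) (m : Nat)
    (st : List (List Int) × Int) (tmp : List Int) :
    ((List.range m).map (fun t : Nat => j0 + (t : Int))).foldl (body2e A) ((st, tmp), a)
      = ((((List.range m).map (fun t : Nat => a - (t : Int))).foldl (wbody A d) st,
          tmp ++ (List.range m).map (fun t : Nat =>
            PySem.List.pyGetD (PySem.List.pyGetD A (a - (t : Int)) []) (j0 + (t : Int)) 0)),
          a - m) := by
  rw [← ha]; exact inner2e A d m j0 st tmp

theorem inner2o' (A : List (List Int)) (d i0 a : Int) (ha : d - i0 = a) (m : Nat)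
    (st : List (List Int) × Int) (tmp : List Int) :
    ((List.range m).map (fun t : Nat => i0 + (t : Int))).foldl (body2o A) ((st, tmp), a)
      = ((((List.range m).map (fun t : Nat => i0 + (t : Int))).foldl (wbody A d) st, tmp),
          a - m) := by
  rw [← ha]; exact inner2o A d m i0 st tmp

theorem loop1 (A : List (List Int)) (n : Int) :
    ∀ (m : Nat) (k0 : Int) (st : List (List Int) × Int),
      0 ≤ k0 → k0 + m ≤ n →
      (PySem.List.pyRange k0 (k0 + m) 1).foldl (outer1 A) (st, PySem.Int.mod k0 2)
        = ((PySem.List.pyRange k0 (k0 + m) 1).foldl (dwrite A n) st,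
            PySem.Int.mod (k0 + m) 2) := by
  intro m
  induction m with
  | zero =>
    intro k0 st _ _
    simp only [Nat.cast_zero, add_zero, PySem.List.pyRange_one_eq_nil le_rfl, List.foldl_nil]
  | succ m ih =>
    intro k0 st h0 hle
    push_cast at hle
    have hcons : PySem.List.pyRange k0 (k0 + ((m : Nat) + 1 : Nat)) 1
        = k0 :: PySem.List.pyRange (k0 + 1) ((k0 + 1) + (m : Nat)) 1 := by
      rw [show k0 + (((m : Nat) + 1 : Nat) : Int) = (k0 + 1) + ((m : Nat) : Int) by push_cast; ring,
        PySem.List.pyRange_one_cons (by omega)]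
    rw [hcons]
    simp only [List.foldl_cons]
    have hmod : PySem.Int.mod k0 2 = k0 % 2 :=
      PySem.Int.mod_eq_emod_of_pos (by norm_num)
    have hmod1 : PySem.Int.mod (k0 + 1) 2 = (k0 + 1) % 2 :=
      PySem.Int.mod_eq_emod_of_pos (by norm_num)
    have hr : PySem.List.pyRange 0 (k0 + 1) 1
        = (List.range (k0.toNat + 1)).map (fun t : Nat => (0 : Int) + t) := by
      rw [PySem.List.pyRange_one, show (k0 + 1 - 0).toNat = k0.toNat + 1 by omega]
    have hdesc : PySem.List.pyRange (min k0 (n - 1)) (max 0 (k0 - n + 1) - 1) (-1)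
        = (List.range (k0.toNat + 1)).map (fun t : Nat => k0 - (t : Int)) := by
      rw [show min k0 (n - 1) = k0 by omega, show max 0 (k0 - n + 1) = 0 by omega,
        PySem.List.pyRange_neg_one, show (k0 - (0 - 1)).toNat = k0.toNat + 1 by omega]
    rcases Int.emod_two_eq_zero_or_one k0 with he | ho
    · -- dir = 0: A runs the j-ascending pass, the diagonal is walked downwards
      have hd0 : PySem.Int.mod k0 2 = 0 := by rw [hmod, he]
      have hd1 : PySem.Int.mod (k0 + 1) 2 = 1 := by rw [hmod1]; omega
      have houter : outer1 A (st, PySem.Int.mod k0 2) k0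
          = (((List.range (k0.toNat + 1)).map (fun t : Nat => k0 - (t : Int))).foldl
              (wbody A k0) st, 1) := by
        unfold outer1
        rw [if_pos hd0, hr,
          show ((st, k0) : (List (List Int) × Int) × Int) = (st, k0 - (0 : Int)) by norm_num,
          inner1e A k0 (k0.toNat + 1) 0 st]
        simp only [sub_zero]
      have hdwk : dwrite A n st k0
          = ((List.range (k0.toNat + 1)).map (fun t : Nat => k0 - (t : Int))).foldl
              (wbody A k0) st := by
        unfold dwrite
        rw [if_neg (by omega), hdesc]
      have ih' := ih (k0 + 1) (dwrite A n st k0) (by omega) (by omega)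
      rw [hd1] at ih'
      rw [houter, ← hdwk, ih']
      simp only [Prod.mk.injEq, true_and]
      congr 1
      push_cast
      ring
    · -- dir = 1: A runs the i-ascending pass, the diagonal is walked upwards
      have hd0 : PySem.Int.mod k0 2 = 1 := by rw [hmod, ho]
      have hd1 : PySem.Int.mod (k0 + 1) 2 = 0 := by rw [hmod1]; omega
      have houter : outer1 A (st, PySem.Int.mod k0 2) k0
          = (((List.range (k0.toNat + 1)).map (fun t : Nat => (0 : Int) + t)).foldl
              (wbody A k0) st, 0) := by
        unfold outer1
        rw [if_neg (by omega), hr,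
          show ((st, k0) : (List (List Int) × Int) × Int) = (st, k0 - (0 : Int)) by norm_num,
          inner1o A k0 (k0.toNat + 1) 0 st]
      have hdwk : dwrite A n st k0
          = ((List.range (k0.toNat + 1)).map (fun t : Nat => (0 : Int) + t)).foldl
              (wbody A k0) st := by
        unfold dwrite
        rw [if_pos hd0, hdesc, rev_desc (k0.toNat + 1) k0 0 (by omega)]
      have ih' := ih (k0 + 1) (dwrite A n st k0) (by omega) (by omega)
      rw [hd1] at ih'
      rw [houter, ← hdwk, ih']
      simp only [Prod.mk.injEq, true_and]
      congr 1
      push_cast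
      ring

theorem loop2 (A : List (List Int)) (n : Int) :
    ∀ (m : Nat) (k0 : Int) (st : List (List Int) × Int) (tmp : List Int),
      1 ≤ k0 → k0 + m ≤ n →
      ∃ t, (PySem.List.pyRange k0 (k0 + m) 1).foldl (outer2 A n)
              ((st, tmp), PySem.Int.mod (n - 1 + k0) 2)
        = (((PySem.List.pyRange (n - 1 + k0) (n - 1 + k0 + m) 1).foldl (dwrite A n) st, t),
            PySem.Int.mod (n - 1 + k0 + m) 2) := by
  intro m
  induction m with
  | zero =>
    intro k0 st tmp _ _
    exact ⟨tmp, by simp only [Nat.cast_zero, add_zero,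
      PySem.List.pyRange_one_eq_nil le_rfl, List.foldl_nil]⟩
  | succ m ih =>
    intro k0 st tmp h1 hle
    push_cast at hle
    have hk : PySem.List.pyRange k0 (k0 + ((m : Nat) + 1 : Nat)) 1
        = k0 :: PySem.List.pyRange (k0 + 1) ((k0 + 1) + (m : Nat)) 1 := by
      rw [show k0 + (((m : Nat) + 1 : Nat) : Int) = (k0 + 1) + ((m : Nat) : Int) by push_cast; ring,
        PySem.List.pyRange_one_cons (by omega)]
    have hD : PySem.List.pyRange (n - 1 + k0) (n - 1 + k0 + ((m : Nat) + 1 : Nat)) 1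
        = (n - 1 + k0) :: PySem.List.pyRange (n - 1 + (k0 + 1)) ((n - 1 + (k0 + 1)) + (m : Nat)) 1 := by
      rw [show n - 1 + k0 + (((m : Nat) + 1 : Nat) : Int) = (n - 1 + (k0 + 1)) + ((m : Nat) : Int) by push_cast; ring,
        PySem.List.pyRange_one_cons (by omega)]
      ring_nf
    rw [hk, hD]
    simp only [List.foldl_cons]
    have hmod : PySem.Int.mod (n - 1 + k0) 2 = (n - 1 + k0) % 2 :=
      PySem.Int.mod_eq_emod_of_pos (by norm_num)
    have hmod1 : PySem.Int.mod (n - 1 + (k0 + 1)) 2 = (n - 1 + (k0 + 1)) % 2 :=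
      PySem.Int.mod_eq_emod_of_pos (by norm_num)
    have hr2 : PySem.List.pyRange k0 n 1
        = (List.range ((n - k0).toNat)).map (fun t : Nat => k0 + (t : Int)) :=
      PySem.List.pyRange_one k0 n
    have hdesc : PySem.List.pyRange (min (n - 1 + k0) (n - 1)) (max 0 (n - 1 + k0 - n + 1) - 1) (-1)
        = (List.range ((n - k0).toNat)).map (fun t : Nat => n - 1 - (t : Int)) := by
      rw [show min (n - 1 + k0) (n - 1) = n - 1 by omega,
        show max 0 (n - 1 + k0 - n + 1) = k0 by omega,
        PySem.List.pyRange_neg_one, show (n - 1 - (k0 - 1)).toNat = (n - k0).toNat by omega]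
    rcases Int.emod_two_eq_zero_or_one (n - 1 + k0) with he | ho
    · -- dir = 0: the j-ascending pass with the tmp.append, diagonal walked downwards
      have hd0 : PySem.Int.mod (n - 1 + k0) 2 = 0 := by rw [hmod, he]
      have hd1 : PySem.Int.mod (n - 1 + (k0 + 1)) 2 = 1 := by rw [hmod1]; omega
      have houter : outer2 A n ((st, tmp), PySem.Int.mod (n - 1 + k0) 2) k0
          = ((((List.range ((n - k0).toNat)).map (fun t : Nat => n - 1 - (t : Int))).foldl
              (wbody A (n - 1 + k0)) st,
              tmp ++ (List.range ((n - k0).toNat)).map (fun t : Nat =>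
                PySem.List.pyGetD (PySem.List.pyGetD A (n - 1 - (t : Int)) []) (k0 + (t : Int)) 0)),
              1) := by
        unfold outer2
        rw [if_pos hd0, hr2,
          inner2e' A (n - 1 + k0) k0 (n - 1) (by ring) ((n - k0).toNat) st tmp]
      have hdwk : dwrite A n st (n - 1 + k0)
          = ((List.range ((n - k0).toNat)).map (fun t : Nat => n - 1 - (t : Int))).foldl
              (wbody A (n - 1 + k0)) st := by
        unfold dwrite
        rw [if_neg (by omega), hdesc]
      obtain ⟨t, ih'⟩ := ih (k0 + 1) (dwrite A n st (n - 1 + k0))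
        (tmp ++ (List.range ((n - k0).toNat)).map (fun t : Nat =>
          PySem.List.pyGetD (PySem.List.pyGetD A (n - 1 - (t : Int)) []) (k0 + (t : Int)) 0))
        (by omega) (by omega)
      rw [hd1] at ih'
      refine ⟨t, ?_⟩
      rw [houter, ← hdwk, ih']
      simp only [Prod.mk.injEq, true_and]
      congr 1; omega
    · -- dir = 1: the i-ascending pass, diagonal walked upwards, tmp untouched
      have hd0 : PySem.Int.mod (n - 1 + k0) 2 = 1 := by rw [hmod, ho]
      have hd1 : PySem.Int.mod (n - 1 + (k0 + 1)) 2 = 0 := by rw [hmod1]; omega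
      have houter : outer2 A n ((st, tmp), PySem.Int.mod (n - 1 + k0) 2) k0
          = ((((List.range ((n - k0).toNat)).map (fun t : Nat => k0 + (t : Int))).foldl
              (wbody A (n - 1 + k0)) st, tmp), 0) := by
        unfold outer2
        rw [if_neg (by omega), hr2,
          inner2o' A (n - 1 + k0) k0 (n - 1) (by ring) ((n - k0).toNat) st tmp]
      have hdwk : dwrite A n st (n - 1 + k0)
          = ((List.range ((n - k0).toNat)).map (fun t : Nat => k0 + (t : Int))).foldl
              (wbody A (n - 1 + k0)) st := by
        unfold dwrite
        rw [if_pos hd0, hdesc, rev_desc ((n - k0).toNat) (n - 1) k0 (by omega)]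
      obtain ⟨t, ih'⟩ := ih (k0 + 1) (dwrite A n st (n - 1 + k0)) tmp (by omega) (by omega)
      rw [hd1] at ih'
      refine ⟨t, ?_⟩
      rw [houter, ← hdwk, ih']
      simp only [Prod.mk.injEq, true_and]
      congr 1; omega

-- A's result as the canonical diagonal fold (the common form both proofs meet at)
theorem a_eq_dfold (A : List (List Int)) (h : 1 ≤ A.length) :
    helical_rev A
      = ((PySem.List.pyRange 0 (2 * (A.length : Int) - 1) 1).foldl
          (dwrite A (A.length : Int))
          (List.replicate A.length (List.replicate A.length 0), 0)).1 := by
  have h1 := loop1 A (A.length : Int) A.length 0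
    (List.replicate A.length (List.replicate A.length 0), 0) le_rfl (by omega)
  rw [show PySem.Int.mod 0 2 = 0 from by decide, zero_add] at h1
  obtain ⟨t, h2⟩ := loop2 A (A.length : Int) (A.length - 1) 1
    ((PySem.List.pyRange 0 (A.length : Int) 1).foldl (dwrite A (A.length : Int))
      (List.replicate A.length (List.replicate A.length 0), 0)) [] le_rfl (by omega)
  rw [show ((A.length : Int) - 1 + 1) = (A.length : Int) by ring,
    show ((1 : Int) + ((A.length - 1 : Nat) : Int)) = (A.length : Int) by omega,
    show ((A.length : Int) + ((A.length - 1 : Nat) : Int)) = 2 * (A.length : Int) - 1 by omega] at h2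
  simp only [helical_rev]
  rw [h1]
  dsimp only
  rw [h2,
    PySem.List.pyRange_one_append 0 (A.length : Int) (2 * (A.length : Int) - 1)
      (by positivity) (by omega),
    List.foldl_append]

-- ===== the B side: functional-matrix view =====
def M (n : Nat) (f : Nat → Nat → Int) : List (List Int) :=
  (List.range n).map (fun i => (List.range n).map (f i))

theorem M_congr (n : Nat) (f g : Nat → Nat → Int)
    (h : ∀ a, a < n → ∀ b, b < n → f a b = g a b) : M n f = M n g := by
  unfold M
  apply List.ext_getElem
  · simp
  · intro i h1 h2
    simp at h1
    apply List.ext_getElem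
    · simp
    · intro j h3 h4
      simp only [List.getElem_map, List.getElem_range]
      exact h i h1 j (by simpa using h3)

theorem set_map_range {α : Type} (n : Nat) (g : Nat → α) (k : Nat) (v : α) (hk : k < n) :
    ((List.range n).map g).set k v
      = (List.range n).map (fun a => if a = k then v else g a) := by
  apply List.ext_getElem
  · simp
  · intro i h1 h2
    simp at h1
    rw [List.getElem_set]
    by_cases hik : k = i
    · simp [hik]
    · have : i ≠ k := fun hh => hik hh.symm
      simp [hik, this]

theorem set_M (n : Nat) (f : Nat → Nat → Int) (i j : Int) (v : Int)
    (hi0 : 0 ≤ i) (hin : i < n) (hj0 : 0 ≤ j) (hjn : j < n) :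
    pySet2 (M n f) i j v
      = M n (fun a b => if (a : Int) = i ∧ (b : Int) = j then v else f a b) := by
  have hlen : (M n f).length = n := by simp [M]
  have hrow : (M n f).getD i.toNat [] = (List.range n).map (f i.toNat) := by
    rw [List.getD_eq_getElem _ _ (by rw [hlen]; omega)]
    simp [M]
  simp only [pySet2, hlen, hrow]
  rw [if_neg (by omega), if_neg (by omega), hrow]
  rw [set_map_range n (f i.toNat) j.toNat v (by omega)]
  unfold M
  rw [set_map_range n (fun a => List.map (f a) (List.range n)) i.toNat _ (by omega)]
  apply List.map_congr_left
  intro a ha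
  rw [List.mem_range] at ha
  by_cases hai : a = i.toNat
  · rw [if_pos hai]
    apply List.map_congr_left
    intro b hb
    rw [List.mem_range] at hb
    dsimp only
    by_cases hbj : b = j.toNat
    · rw [if_pos hbj, if_pos ⟨by omega, by omega⟩]
    · rw [if_neg hbj, if_neg (by push_cast; omega)]
      rw [hai]
  · rw [if_neg hai]
    apply List.map_congr_left
    intro b hb
    dsimp only
    rw [if_neg (by push_cast; omega)]

-- the fold along one diagonal, descending (even d) coordinates
theorem diag_desc (A : List (List Int)) (n : Nat) (d : Int) (hi : Int) (f : Nat → Nat → Int)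
    (c : Int) :
    ∀ (L : Nat), (0 ≤ hi - L + 1) → (hi < n) → (d - hi ≥ 0) → (d - (hi - L + 1) < n) →
    ((List.range L).map (fun t : Nat => hi - (t : Int))).foldl (wbody A d) (M n f, c)
      = (M n (fun a b => if (a : Int) + b = d ∧ hi - L < a ∧ (a : Int) ≤ hi
              then srcA A (c + (hi - a)) else f a b), c + L) := by
  intro L
  induction L with
  | zero =>
    intro _ _ _ _
    simp only [List.range_zero, List.map_nil, List.foldl_nil, Nat.cast_zero, add_zero]
    refine Prod.ext ?_ rfl
    show M n f = _
    refine M_congr n f _ ?_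
    intro a _ b _
    rw [if_neg (by push_cast; omega)]
  | succ L ih =>
    intro hL1 hL2 hL3 hL4
    rw [List.range_succ]
    simp only [List.map_append, List.foldl_append, List.map_cons, List.map_nil,
      List.foldl_cons, List.foldl_nil]
    rw [ih (by push_cast at hL1 ⊢; omega) hL2 hL3 (by push_cast at hL4 ⊢; omega)]
    simp only [wbody]
    rw [set_M n _ (hi - L) (d - (hi - L)) _ (by push_cast at hL1; omega)
      (by push_cast; omega) (by push_cast; omega) (by push_cast at hL4 ⊢; omega)]
    refine Prod.ext ?_ (by push_cast; ring)
    dsimp only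
    refine M_congr n _ _ ?_
    intro a _ b _
    by_cases h1 : (a : Int) = hi - L ∧ (b : Int) = d - (hi - L)
    · rw [if_pos h1, if_pos (by push_cast; omega)]
      congr 1
      omega
    · rw [if_neg h1]
      by_cases h2 : (a : Int) + b = d ∧ hi - L < a ∧ (a : Int) ≤ hi
      · rw [if_pos h2, if_pos (by push_cast; omega)]
      · rw [if_neg h2, if_neg (by push_cast at h1 h2 ⊢; omega)]

-- the fold along one diagonal, ascending (odd d) coordinates
theorem diag_asc (A : List (List Int)) (n : Nat) (d : Int) (lo : Int) (f : Nat → Nat → Int)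
    (c : Int) :
    ∀ (L : Nat), (0 ≤ lo) → ((lo + L - 1) < n) → (d - (lo + L - 1) ≥ 0) → (d - lo < n) →
    ((List.range L).map (fun t : Nat => lo + (t : Int))).foldl (wbody A d) (M n f, c)
      = (M n (fun a b => if (a : Int) + b = d ∧ lo ≤ a ∧ (a : Int) < lo + L
              then srcA A (c + (a - lo)) else f a b), c + L) := by
  intro L
  induction L with
  | zero =>
    intro _ _ _ _
    simp only [List.range_zero, List.map_nil, List.foldl_nil, Nat.cast_zero, add_zero]
    refine Prod.ext ?_ rfl
    show M n f = _
    refine M_congr n f _ ?_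
    intro a _ b _
    rw [if_neg (by push_cast; omega)]
  | succ L ih =>
    intro hL1 hL2 hL3 hL4
    rw [List.range_succ]
    simp only [List.map_append, List.foldl_append, List.map_cons, List.map_nil,
      List.foldl_cons, List.foldl_nil]
    rw [ih hL1 (by push_cast at hL2 ⊢; omega) (by push_cast at hL3 ⊢; omega) hL4]
    simp only [wbody]
    rw [set_M n _ (lo + L) (d - (lo + L)) _ (by push_cast; omega)
      (by push_cast at hL2 ⊢; omega) (by push_cast at hL3 ⊢; omega) (by push_cast; omega)]
    refine Prod.ext ?_ (by push_cast; ring)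
    dsimp only
    refine M_congr n _ _ ?_
    intro a _ b _
    by_cases h1 : (a : Int) = lo + L ∧ (b : Int) = d - (lo + L)
    · rw [if_pos h1, if_pos (by push_cast; omega)]
      congr 1
      omega
    · rw [if_neg h1]
      by_cases h2 : (a : Int) + b = d ∧ lo ≤ a ∧ (a : Int) < lo + L
      · rw [if_pos h2, if_pos (by push_cast; omega)]
      · rw [if_neg h2, if_neg (by push_cast at h1 h2 ⊢; omega)]

-- arithmetic of the closed-form rank: triangular counts and the recurrence
theorem floordiv_two_mul (k : Int) : PySem.Int.floordiv (2 * k) 2 = k := by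
  rw [PySem.Int.floordiv_eq_ediv_of_pos (by norm_num)]
  omega

theorem triB_zero (n : Int) (hn : 1 ≤ n) : triB n 0 = 0 := by
  unfold triB
  rw [if_pos (by omega)]
  norm_num

theorem triB_succ (n d : Int) (hn : 1 ≤ n) (h0 : 0 ≤ d) (hd : d ≤ 2 * n - 2) :
    triB n (d + 1) = triB n d + (min d (n - 1) - max 0 (d - n + 1) + 1) := by
  obtain ⟨k, hk⟩ := Int.even_mul_succ_self d
  unfold triB
  by_cases h1 : d + 1 < n
  · rw [if_pos h1, if_pos (by omega)]
    rw [show (d + 1) * (d + 1 + 1) = 2 * (k + (d + 1)) by linear_combination hk,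
      show d * (d + 1) = 2 * k by linear_combination hk,
      floordiv_two_mul, floordiv_two_mul]
    omega
  · by_cases h2 : d < n
    · rw [if_neg h1, if_pos h2]
      have hd1 : d = n - 1 := by omega
      rw [show (2 * n - 1 - (d + 1)) * (2 * n - (d + 1)) = 2 * k by
          rw [hd1]; rw [hd1] at hk; linear_combination hk,
        show d * (d + 1) = 2 * k by linear_combination hk,
        floordiv_two_mul]
      have hnn : n * n = 2 * k + n := by rw [hd1] at hk; linear_combination hk
      rw [show min d (n - 1) = n - 1 by omega, show max 0 (d - n + 1) = 0 by omega]
      linarith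
    · rw [if_neg h1, if_neg (by omega)]
      obtain ⟨r, hr⟩ := Int.even_mul_succ_self (2 * n - 1 - d)
      rw [show (2 * n - 1 - d) * (2 * n - d) = 2 * r by linear_combination hr,
        show (2 * n - 1 - (d + 1)) * (2 * n - (d + 1)) = 2 * (r - (2 * n - 1 - d)) by
          linear_combination hr,
        floordiv_two_mul, floordiv_two_mul]
      rw [show min d (n - 1) = n - 1 by omega, show max 0 (d - n + 1) = d - n + 1 by omega]
      linarith

-- the outer fold over all diagonals produces the closed-form matrix
theorem dfold_closed (A : List (List Int)) (n : Nat) (hn : 1 ≤ n) :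
    ∀ (m : Nat), m ≤ 2 * n - 1 →
    (PySem.List.pyRange 0 (m : Int) 1).foldl (dwrite A (n : Int)) (M n (fun _ _ => 0), 0)
      = (M n (fun a b => if (a : Int) + b < (m : Int)
              then srcA A (rankB (n : Int) a b) else 0), triB (n : Int) m) := by
  intro m
  induction m with
  | zero =>
    intro _
    rw [Nat.cast_zero, PySem.List.pyRange_one_eq_nil le_rfl, List.foldl_nil,
      triB_zero (n : Int) (by exact_mod_cast hn)]
    refine Prod.ext ?_ rfl
    show M n _ = _
    refine M_congr n _ _ ?_
    intro a _ b _
    rw [if_neg (by push_cast; omega)]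
  | succ m ih =>
    intro hm
    have hsplit : PySem.List.pyRange 0 ((m + 1 : Nat) : Int) 1
        = PySem.List.pyRange 0 (m : Int) 1 ++ [(m : Int)] := by
      push_cast
      exact PySem.List.pyRange_one_succ_right (by positivity)
    rw [hsplit, List.foldl_append, ih (by omega), List.foldl_cons, List.foldl_nil]
    have hdesc := PySem.List.pyRange_neg_one (min (m : Int) ((n : Int) - 1))
      (max 0 ((m : Int) - (n : Int) + 1) - 1)
    simp only [dwrite]
    by_cases hpar : PySem.Int.mod (m : Int) 2 = 1
    · -- odd diagonal: walked upwards
      rw [if_pos hpar, hdesc,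
        rev_desc _ (min (m : Int) ((n : Int) - 1)) (max 0 ((m : Int) - (n : Int) + 1))
          (by omega),
        diag_asc A n (m : Int) (max 0 ((m : Int) - (n : Int) + 1)) _ _ _
          (by omega) (by omega) (by omega) (by omega)]
      refine Prod.ext ?_ ?_
      · dsimp only
        refine M_congr n _ _ ?_
        intro a ha b hb
        by_cases hD : (a : Int) + b = (m : Int)
        · rw [if_pos ⟨hD, by omega, by omega⟩, if_pos (by push_cast; omega)]
          congr 1
          simp only [rankB, hD, if_pos hpar]
        · rw [if_neg (fun h => hD h.1)]
          by_cases hlt : (a : Int) + b < (m : Int)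
          · rw [if_pos hlt, if_pos (by push_cast; omega)]
          · rw [if_neg hlt, if_neg (by push_cast; omega)]
      · show triB (n : Int) m + _ = triB (n : Int) ((m + 1 : Nat) : Int)
        rw [show ((m + 1 : Nat) : Int) = (m : Int) + 1 by push_cast; ring,
          triB_succ (n : Int) (m : Int) (by exact_mod_cast hn) (by omega) (by omega)]
        omega
    · -- even diagonal: walked downwards
      rw [if_neg hpar, hdesc,
        diag_desc A n (m : Int) (min (m : Int) ((n : Int) - 1)) _ _ _
          (by omega) (by omega) (by omega) (by omega)]
      refine Prod.ext ?_ ?_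
      · dsimp only
        refine M_congr n _ _ ?_
        intro a ha b hb
        by_cases hD : (a : Int) + b = (m : Int)
        · rw [if_pos ⟨hD, by omega, by omega⟩, if_pos (by push_cast; omega)]
          congr 1
          simp only [rankB, hD, if_neg hpar]
        · rw [if_neg (fun h => hD h.1)]
          by_cases hlt : (a : Int) + b < (m : Int)
          · rw [if_pos hlt, if_pos (by push_cast; omega)]
          · rw [if_neg hlt, if_neg (by push_cast; omega)]
      · show triB (n : Int) m + _ = triB (n : Int) ((m + 1 : Nat) : Int)
        rw [show ((m + 1 : Nat) : Int) = (m : Int) + 1 by push_cast; ring,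
          triB_succ (n : Int) (m : Int) (by exact_mod_cast hn) (by omega) (by omega)]
        omega

-- B's port as the same functional matrix
theorem alt_closed (A : List (List Int)) :
    helical_rev_alt A = M A.length (fun a b => srcA A (rankB (A.length : Int) a b)) := by
  simp only [helical_rev_alt, M]
  rw [PySem.List.pyRange_one, show ((A.length : Int) - 0).toNat = A.length by omega]
  simp only [List.map_map, Function.comp_def, zero_add]

theorem ports_agree (A : List (List Int)) : helical_rev A = helical_rev_alt A := by
  rcases A with _ | ⟨a0, as⟩
  · rfl
  · have h : 1 ≤ (a0 :: as).length := by simp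
    rw [a_eq_dfold _ h]
    have hB0 : (List.replicate (a0 :: as).length (List.replicate (a0 :: as).length (0 : Int)))
        = M (a0 :: as).length (fun _ _ => 0) := by
      apply List.ext_getElem
      · simp [M]
      · intro i h1 h2
        simp [M, List.getElem_replicate]
    rw [hB0,
      show (2 * ((a0 :: as).length : Int) - 1) = ((2 * (a0 :: as).length - 1 : Nat) : Int) by
        push_cast [Nat.cast_sub (by omega : 1 ≤ 2 * (a0 :: as).length)]; ring,
      dfold_closed (a0 :: as) (a0 :: as).length h (2 * (a0 :: as).length - 1) le_rfl]
    dsimp only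
    rw [alt_closed]
    refine M_congr _ _ _ ?_
    intro a ha b hb
    rw [if_pos (by push_cast [Nat.cast_sub (by omega : 1 ≤ 2 * (a0 :: as).length)]; omega)]

-- ===== VERDICT (by name: the statement is the Claim_ definition above) =====
theorem helical_rev_spec : Claim_equal_helical_rev := by
  intro A _ _
  unfold Spec_helical_rev
  exact ports_agree A
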